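-- pv_equiv track=rewrite | github.com/dolonet/wagstaff-chebyshev | scripts/secondary_closure.py | pow_z2
-- ===== SOURCE A (Python) =====
-- def mul_z2(a, b, r):
--     return ((a[0]*b[0] + 2*a[1]*b[1]) % r, (a[0]*b[1] + a[1]*b[0]) % r)
--
-- def pow_z2(base, exp, r):
--     result = (1, 0)
--     b = (base[0] % r, base[1] % r)
--     while exp > 0:
--         if exp & 1:
--             result = mul_z2(result, b, r)
--         b = mul_z2(b, b, r)
--         exp >>= 1
--     return result
-- ===== SOURCE B (Python) =====
-- def mul_z2(a, b, r):
--     return ((a[0]*b[0] + 2*a[1]*b[1]) % r, (a[0]*b[1] + a[1]*b[0]) % r)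
--
-- def pow_z2(base, exp, r):
--     # left-to-right (MSB-first) binary method: extract the bit list once,
--     # then fold over it squaring the ACCUMULATOR (A squares the base, LSB-first)
--     b = (base[0] % r, base[1] % r)
--     bits = []
--     e = exp
--     while e > 0:
--         bits.append(e & 1)
--         e >>= 1
--     result = (1, 0)
--     for bit in reversed(bits):
--         result = mul_z2(result, result, r)
--         if bit:
--             result = mul_z2(result, b, r)
--     return result
-- ===== Notes on version B (the rewrite author's own statement) =====
-- stated objective: alternative
-- what changed: Replaces A's LSB-first loop that keeps squaring the base and conditionally multiplying an accumulator by a two-stage MSB-first binary method: first extract exp's bit list, then fold over it most-significant-bit first, squaring the accumulator and multiplying in the reduced base when the bit is set; Pre_ excludes only r == 0, where both raise ZeroDivisionError.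
import Mathlib
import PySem

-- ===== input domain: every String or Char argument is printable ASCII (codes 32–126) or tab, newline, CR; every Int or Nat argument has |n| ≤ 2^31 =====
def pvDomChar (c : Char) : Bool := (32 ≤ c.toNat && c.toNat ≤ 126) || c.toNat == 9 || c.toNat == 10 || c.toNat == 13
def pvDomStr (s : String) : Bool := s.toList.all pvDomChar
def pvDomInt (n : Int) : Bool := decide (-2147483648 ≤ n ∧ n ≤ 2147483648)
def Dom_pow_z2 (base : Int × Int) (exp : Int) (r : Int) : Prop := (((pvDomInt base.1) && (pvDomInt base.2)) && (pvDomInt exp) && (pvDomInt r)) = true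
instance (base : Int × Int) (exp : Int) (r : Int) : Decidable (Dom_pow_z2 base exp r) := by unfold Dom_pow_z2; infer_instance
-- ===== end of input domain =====

-- B replaces A's LSB-first base-squaring loop by a two-stage MSB-first binary method (bit list, then a fold squaring the accumulator); same cost, equal return values for r ≠ 0.

-- shared module helper mul_z2 (used verbatim by both Pythons)
def mulz2 (a b : Int × Int) (r : Int) : Int × Int :=
  (PySem.Int.mod (a.1 * b.1 + 2 * a.2 * b.2) r, PySem.Int.mod (a.1 * b.2 + a.2 * b.1) r)

-- termination measure fact for Python's 'e >>= 1'
theorem pvShiftToNatLt (e : Int) (h : 0 < e) : (e >>> (1 : Nat)).toNat < e.toNat := by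
  obtain ⟨n, rfl⟩ : ∃ n : Nat, e = (n : Int) := ⟨e.toNat, by omega⟩
  have hc : ((n : Int) >>> (1 : Nat)) = ((n >>> 1 : Nat) : Int) := rfl
  rw [hc]
  have h2 : n >>> 1 = n / 2 := Nat.shiftRight_one n
  omega

-- ===== PORT A =====
def powLoopA (result b : Int × Int) (exp r : Int) : Int × Int :=
  if h : exp > 0 then
    powLoopA (if PySem.Int.band exp 1 ≠ 0 then mulz2 result b r else result)
      (mulz2 b b r) (exp >>> (1 : Nat)) r
  else result
termination_by exp.toNat
decreasing_by exact pvShiftToNatLt exp h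

def pow_z2 (base : Int × Int) (exp : Int) (r : Int) : Int × Int :=
  powLoopA (1, 0) (PySem.Int.mod base.1 r, PySem.Int.mod base.2 r) exp r

-- ===== PORT B =====
-- first stage of B: 'while e > 0: bits.append(e & 1); e >>= 1'
def bitsLoopB (e : Int) (acc : List Int) : List Int :=
  if h : e > 0 then bitsLoopB (e >>> (1 : Nat)) (acc ++ [PySem.Int.band e 1]) else acc
termination_by e.toNat
decreasing_by exact pvShiftToNatLt e h

-- body of B's 'for bit in reversed(bits)' loop
def stepB (r : Int) (b : Int × Int) (result : Int × Int) (bit : Int) : Int × Int :=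
  let s := mulz2 result result r
  if bit ≠ 0 then mulz2 s b r else s

def pow_z2_alt (base : Int × Int) (exp : Int) (r : Int) : Int × Int :=
  let b := (PySem.Int.mod base.1 r, PySem.Int.mod base.2 r)
  ((bitsLoopB exp []).reverse).foldl (stepB r b) (1, 0)

-- ===== PRECONDITION & SPEC =====
-- Pre_ excludes exactly r = 0, on which both Pythons raise ZeroDivisionError in '% r'.
def Pre_pow_z2 (base : Int × Int) (exp : Int) (r : Int) : Prop := r ≠ 0
instance (base : Int × Int) (exp : Int) (r : Int) : Decidable (Pre_pow_z2 base exp r) := by unfold Pre_pow_z2; infer_instance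
def pvWitness_pow_z2 : (Int × Int) × Int × Int := ((3, 2), 10, 7)

def Spec_pow_z2 (base : Int × Int) (exp : Int) (r : Int) (out : Int × Int) : Prop := out = pow_z2_alt base exp r
instance (base : Int × Int) (exp : Int) (r : Int) (out : Int × Int) : Decidable (Spec_pow_z2 base exp r out) := by unfold Spec_pow_z2; infer_instance

-- ===== CLAIM (what is proved, stated in full; the proofs are below) =====
def Claim_equal_pow_z2 : Prop := ∀ (base : Int × Int) (exp : Int) (r : Int), Dom_pow_z2 base exp r → Pre_pow_z2 base exp r → Spec_pow_z2 base exp r (pow_z2 base exp r)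

-- ===== LEMMAS AND PROOFS =====

-- pure (unreduced) multiplication and power in Z[√2]
def mulp (a b : Int × Int) : Int × Int :=
  (a.1 * b.1 + 2 * a.2 * b.2, a.1 * b.2 + a.2 * b.1)

def pwp (b : Int × Int) : Nat → Int × Int
  | 0 => (1, 0)
  | n + 1 => mulp b (pwp b n)

-- componentwise reduction mod r
def redp (a : Int × Int) (r : Int) : Int × Int := (PySem.Int.mod a.1 r, PySem.Int.mod a.2 r)

-- componentwise congruence mod r
def Rp (r : Int) (a b : Int × Int) : Prop := r ∣ (a.1 - b.1) ∧ r ∣ (a.2 - b.2)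

theorem mulz2_eq_redp_mulp (a b : Int × Int) (r : Int) : mulz2 a b r = redp (mulp a b) r := rfl

theorem mod_congr (r a b : Int) (hr : r ≠ 0) (h : r ∣ a - b) :
    PySem.Int.mod a r = PySem.Int.mod b r := by
  have ea := PySem.Int.floordiv_mul_add_mod a r
  have eb := PySem.Int.floordiv_mul_add_mod b r
  have hd : r ∣ (PySem.Int.mod a r - PySem.Int.mod b r) := by
    obtain ⟨k, hk⟩ := h
    exact ⟨k - PySem.Int.floordiv a r + PySem.Int.floordiv b r, by linarith [hk]⟩
  have hz : PySem.Int.mod a r - PySem.Int.mod b r = 0 := by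
    apply Int.eq_zero_of_dvd_of_natAbs_lt_natAbs hd
    rcases lt_or_gt_of_ne hr with h0 | h0
    · have ba := PySem.Int.mod_neg_bounds a h0
      have bb := PySem.Int.mod_neg_bounds b h0
      omega
    · have ba1 := PySem.Int.mod_nonneg a h0
      have ba2 := PySem.Int.mod_lt a h0
      have bb1 := PySem.Int.mod_nonneg b h0
      have bb2 := PySem.Int.mod_lt b h0
      omega
  omega

theorem redp_congr {r : Int} (hr : r ≠ 0) {a b : Int × Int} (h : Rp r a b) :
    redp a r = redp b r := by
  unfold redp
  rw [mod_congr r a.1 b.1 hr h.1, mod_congr r a.2 b.2 hr h.2]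

theorem Rp_refl (r : Int) (a : Int × Int) : Rp r a a := ⟨by simp, by simp⟩

theorem mod_sub_self_dvd (r x : Int) : r ∣ PySem.Int.mod x r - x := by
  refine ⟨-(PySem.Int.floordiv x r), ?_⟩
  have := PySem.Int.floordiv_mul_add_mod x r
  linarith

theorem Rp_red (r : Int) (a : Int × Int) : Rp r (redp a r) a :=
  ⟨mod_sub_self_dvd r a.1, mod_sub_self_dvd r a.2⟩

theorem mulp_congr {r : Int} {a a' b b' : Int × Int} (ha : Rp r a a') (hb : Rp r b b') :
    Rp r (mulp a b) (mulp a' b') := by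
  constructor
  · have h1 := dvd_mul_sub_mul ha.1 hb.1
    have h2 := dvd_mul_sub_mul ha.2 hb.2
    have he : (mulp a b).1 - (mulp a' b').1
        = (a.1 * b.1 - a'.1 * b'.1) + 2 * (a.2 * b.2 - a'.2 * b'.2) := by
      simp only [mulp]; ring
    rw [he]
    exact dvd_add h1 (Dvd.dvd.mul_left h2 2)
  · have h1 := dvd_mul_sub_mul ha.1 hb.2
    have h2 := dvd_mul_sub_mul ha.2 hb.1
    have he : (mulp a b).2 - (mulp a' b').2
        = (a.1 * b.2 - a'.1 * b'.2) + (a.2 * b.1 - a'.2 * b'.1) := by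
      simp only [mulp]; ring
    rw [he]
    exact dvd_add h1 h2

theorem pwp_congr {r : Int} {b b' : Int × Int} (h : Rp r b b') (n : Nat) :
    Rp r (pwp b n) (pwp b' n) := by
  induction n with
  | zero => exact Rp_refl r (1, 0)
  | succ n ih => exact mulp_congr h ih

theorem mulp_comm (a b : Int × Int) : mulp a b = mulp b a := by
  simp only [mulp, Prod.mk.injEq]; constructor <;> ring

theorem mulp_assoc (a b c : Int × Int) : mulp (mulp a b) c = mulp a (mulp b c) := by
  simp only [mulp, Prod.mk.injEq]; constructor <;> ring

theorem mulp_one (y : Int × Int) : mulp (1, 0) y = y := by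
  simp [mulp]

theorem pwp_sq (b : Int × Int) (n : Nat) : pwp (mulp b b) n = pwp b (2 * n) := by
  induction n with
  | zero => rfl
  | succ n ih =>
    have h2 : 2 * (n + 1) = (2 * n + 1) + 1 := by ring
    rw [pwp, ih, h2, pwp, pwp, ← mulp_assoc]

theorem pwp_mul_self (b : Int × Int) (n : Nat) :
    mulp (pwp b n) (pwp b n) = pwp (mulp b b) n := by
  induction n with
  | zero => rfl
  | succ k ihk =>
    rw [pwp, pwp, show mulp (mulp b (pwp b k)) (mulp b (pwp b k))
        = mulp (mulp b b) (mulp (pwp b k) (pwp b k)) by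
      rw [mulp_assoc, mulp_assoc]
      congr 1
      rw [← mulp_assoc, mulp_comm (pwp b k) b, mulp_assoc], ihk]

-- decomposition of a positive Int exponent by its low bit and shift
theorem exp_decomp (e : Int) (h : 0 < e) :
    0 ≤ e >>> (1 : Nat) ∧ (PySem.Int.band e 1 = 0 ∨ PySem.Int.band e 1 = 1) ∧
    e.toNat = 2 * (e >>> (1 : Nat)).toNat + (PySem.Int.band e 1).toNat := by
  obtain ⟨n, rfl⟩ : ∃ n : Nat, e = (n : Int) := ⟨e.toNat, by omega⟩
  have hs : ((n : Int) >>> (1 : Nat)) = ((n >>> 1 : Nat) : Int) := rfl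
  have hb : PySem.Int.band (n : Int) 1 = ((n &&& 1 : Nat) : Int) := by
    exact_mod_cast PySem.Int.band_natCast n 1
  have h1 : n >>> 1 = n / 2 := Nat.shiftRight_one n
  have h2 : n &&& 1 = n % 2 := Nat.and_one_is_mod n
  rw [hs, hb]
  omega

-- A's loop computes result * b^exp, reduced mod r
theorem powLoopA_eq (r : Int) (hr : r ≠ 0) :
    ∀ (n : Nat) (e : Int), e.toNat = n → 0 < e →
      ∀ result b, powLoopA result b e r = redp (mulp result (pwp b n)) r := by
  intro n
  induction n using Nat.strong_induction_on with
  | _ n ih =>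
    intro e hn he result b
    obtain ⟨hnn, hbit, hdec⟩ := exp_decomp e he
    rw [powLoopA, dif_pos he]
    by_cases he' : 0 < e >>> (1 : Nat)
    · have hlt : (e >>> (1 : Nat)).toNat < n := hn ▸ pvShiftToNatLt e he
      rw [ih _ hlt _ rfl he']
      set m := (e >>> (1 : Nat)).toNat with hm
      have hsq : Rp r (pwp (mulz2 b b r) m) (pwp b (2 * m)) := by
        rw [← pwp_sq]
        exact pwp_congr (by rw [mulz2_eq_redp_mulp]; exact Rp_red r (mulp b b)) m
      by_cases hodd : PySem.Int.band e 1 ≠ 0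
      · rw [if_pos hodd, mulz2_eq_redp_mulp]
        apply redp_congr hr
        have hb1 : PySem.Int.band e 1 = 1 := by rcases hbit with h0 | h1 <;> omega
        rw [hb1] at hdec
        have hnval : n = 2 * m + 1 := by omega
        have h1 : Rp r (mulp (redp (mulp result b) r) (pwp (mulz2 b b r) m))
            (mulp (mulp result b) (pwp b (2 * m))) :=
          mulp_congr (Rp_red r (mulp result b)) hsq
        have h2 : mulp (mulp result b) (pwp b (2 * m)) = mulp result (pwp b n) := by
          rw [hnval, pwp, mulp_assoc]
        rw [← h2]
        exact h1
      · rw [if_neg hodd]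
        apply redp_congr hr
        have hb0 : PySem.Int.band e 1 = 0 := by omega
        rw [hb0] at hdec
        have hnval : n = 2 * m := by omega
        rw [hnval]
        exact mulp_congr (Rp_refl r result) hsq
    · -- e >>> 1 = 0 : the loop stops after this round; necessarily e = 1, low bit set
      have hm0 : (e >>> (1 : Nat)).toNat = 0 := by omega
      have hb1 : PySem.Int.band e 1 = 1 := by rcases hbit with h0 | h1 <;> omega
      rw [hb1] at hdec
      have hn1 : n = 1 := by omega
      rw [if_pos (by rw [hb1]; exact one_ne_zero)]
      rw [powLoopA, dif_neg (by omega : ¬ e >>> (1 : Nat) > 0)]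
      rw [hn1, pwp, pwp, mulz2_eq_redp_mulp]
      congr 1
      rw [mulp_comm b (1, 0), mulp_one]

-- LSB-first bit list of e (proof-side characterisation of B's first stage)
def lsbBits (e : Int) : List Int :=
  if h : e > 0 then PySem.Int.band e 1 :: lsbBits (e >>> (1 : Nat)) else []
termination_by e.toNat
decreasing_by exact pvShiftToNatLt e h

theorem bitsLoopB_eq : ∀ (n : Nat) (e : Int), e.toNat = n →
    ∀ acc, bitsLoopB e acc = acc ++ lsbBits e := by
  intro n
  induction n using Nat.strong_induction_on with
  | _ n ih =>
    intro e hn acc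
    rw [bitsLoopB, lsbBits]
    by_cases he : e > 0
    · rw [dif_pos he, dif_pos he,
        ih (e >>> (1 : Nat)).toNat (hn ▸ pvShiftToNatLt e he) _ rfl]
      simp
    · rw [dif_neg he, dif_neg he]; simp

-- one stepB on an accumulator congruent to X mod r
theorem stepB_red (r : Int) (hr : r ≠ 0) (b acc X : Int × Int) (hacc : Rp r acc X) (bit : Int) :
    stepB r b acc bit = redp (if bit ≠ 0 then mulp (mulp X X) b else mulp X X) r := by
  simp only [stepB]
  have hs : mulz2 acc acc r = redp (mulp X X) r := by
    rw [mulz2_eq_redp_mulp]; exact redp_congr hr (mulp_congr hacc hacc)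
  by_cases hb : bit ≠ 0
  · rw [if_pos hb, if_pos hb, hs, mulz2_eq_redp_mulp]
    exact redp_congr hr (mulp_congr (Rp_red r (mulp X X)) (Rp_refl r b))
  · rw [if_neg hb, if_neg hb, hs]

-- B's fold over the reversed bit list computes b^e reduced mod r
theorem foldBitsB_eq (r : Int) (hr : r ≠ 0) :
    ∀ (n : Nat) (e : Int), e.toNat = n → 0 < e →
      ∀ b, ((lsbBits e).reverse).foldl (stepB r b) (1, 0) = redp (pwp b n) r := by
  intro n
  induction n using Nat.strong_induction_on with
  | _ n ih =>
    intro e hn he b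
    obtain ⟨hnn, hbit, hdec⟩ := exp_decomp e he
    rw [lsbBits, dif_pos he, List.reverse_cons, List.foldl_append]
    set m := (e >>> (1 : Nat)).toNat with hm
    have hfold : Rp r (((lsbBits (e >>> (1 : Nat))).reverse).foldl (stepB r b) (1, 0))
        (pwp b m) := by
      by_cases he' : 0 < e >>> (1 : Nat)
      · rw [ih m (hn ▸ pvShiftToNatLt e he) _ rfl he']
        exact Rp_red r (pwp b m)
      · have hm0 : m = 0 := by omega
        rw [lsbBits, dif_neg he', hm0]
        exact Rp_refl r (pwp b 0)
    simp only [List.foldl_cons, List.foldl_nil]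
    rw [stepB_red r hr b _ (pwp b m) hfold]
    have h2m : mulp (pwp b m) (pwp b m) = pwp b (2 * m) := by rw [pwp_mul_self, pwp_sq]
    by_cases hodd : PySem.Int.band e 1 ≠ 0
    · have hb1 : PySem.Int.band e 1 = 1 := by rcases hbit with h0 | h1 <;> omega
      rw [hb1] at hdec
      have hnval : n = 2 * m + 1 := by omega
      rw [if_pos hodd, h2m, hnval, pwp, mulp_comm b (pwp b (2 * m))]
    · have hb0 : PySem.Int.band e 1 = 0 := by omega
      rw [hb0] at hdec
      have hnval : n = 2 * m := by omega
      rw [if_neg hodd, h2m, hnval]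

-- ===== VERDICT (by name: the statement is the Claim_ definition above) =====
theorem pow_z2_spec : Claim_equal_pow_z2 := by
  unfold Claim_equal_pow_z2
  intro base exp r _ hr
  unfold Spec_pow_z2 pow_z2 pow_z2_alt
  rw [bitsLoopB_eq exp.toNat exp rfl []]
  simp only [List.nil_append]
  by_cases he : 0 < exp
  · rw [powLoopA_eq r hr exp.toNat exp rfl he,
        foldBitsB_eq r hr exp.toNat exp rfl he, mulp_one]
  · rw [powLoopA, dif_neg (by omega : ¬ exp > 0), lsbBits, dif_neg (by omega : ¬ exp > 0)]
    rfl
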